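-- pv_equiv track=rewrite | github.com/rgjaci/brain-agent-v2 | core/context/assembler.py | apply_best_at_edges
-- ===== SOURCE A (Python) =====
-- def apply_best_at_edges(memories: list) -> list:
--     """
--     Reorder so best memories are at top and bottom (Lost-in-the-Middle mitigation).
--
--     Input already sorted best→worst.
--     Output: best at position 0, second-best at position -1,
--             third-best at position 1, etc.
--     """
--     if len(memories) <= 2:
--         return memories
--
--     top = []
--     bottom = []
--
--     for i, mem in enumerate(memories):
--         if i % 2 == 0:
--             top.append(mem)
--         else:
--             bottom.append(mem)
--
--     # bottom reversed so best of bottom group is at the actual end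
--     return top + list(reversed(bottom))
-- ===== SOURCE B (Python) =====
-- def apply_best_at_edges(memories: list) -> list:
--     """
--     Reorder so best memories are at top and bottom (Lost-in-the-Middle mitigation).
--
--     Closed-form variant: instead of splitting into top/bottom groups, compute
--     for each OUTPUT position k which input rank lands there — position k holds
--     memories[2*k] while 2*k < n (the even ranks laid out from the front) and
--     memories[2*(n-1-k)+1] otherwise (the odd ranks laid out from the back) —
--     and build the result as one comprehension over range(n).
--     """
--     if len(memories) <= 2:
--         return memories
--     n = len(memories)
--     return [memories[2 * k] if 2 * k < n else memories[2 * (n - 1 - k) + 1]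
--             for k in range(n)]
-- ===== Notes on version B (the rewrite author's own statement) =====
-- stated objective: alternative
-- what changed: Replaces the split-into-top/bottom-lists + reverse + concatenate pass with a closed-form index mapping: one comprehension over output positions k that reads memories[2k] or memories[2(n-1-k)+1] directly.
import Mathlib
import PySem

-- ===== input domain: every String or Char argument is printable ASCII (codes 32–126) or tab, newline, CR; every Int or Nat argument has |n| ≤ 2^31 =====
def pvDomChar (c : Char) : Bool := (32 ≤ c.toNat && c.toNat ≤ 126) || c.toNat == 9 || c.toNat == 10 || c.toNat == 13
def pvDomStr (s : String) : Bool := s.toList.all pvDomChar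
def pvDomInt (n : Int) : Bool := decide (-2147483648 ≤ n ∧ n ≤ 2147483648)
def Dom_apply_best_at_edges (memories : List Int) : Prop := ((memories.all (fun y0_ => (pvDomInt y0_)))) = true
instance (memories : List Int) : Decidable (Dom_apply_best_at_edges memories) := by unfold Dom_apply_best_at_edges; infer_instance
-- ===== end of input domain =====

-- B replaces A's split-into-top/bottom-lists + reverse + concatenate pass by a
-- closed-form index mapping: one comprehension over output positions (objective: alternative).

-- ===== PORT A =====
def apply_best_at_edges (memories : List Int) : List Int :=
  if memories.length ≤ 2 then memories
  else
    -- top = []; bottom = []; for i, mem in enumerate(memories): ...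
    let st := (PySem.List.enumerate memories).foldl
      (fun (st : List Int × List Int) p =>
        if PySem.Int.mod p.1 2 == 0 then (st.1 ++ [p.2], st.2) else (st.1, st.2 ++ [p.2]))
      ([], [])
    st.1 ++ st.2.reverse

-- ===== PORT B =====
def apply_best_at_edges_alt (memories : List Int) : List Int :=
  if memories.length ≤ 2 then memories
  else
    let n : Int := memories.length
    -- [memories[2*k] if 2*k < n else memories[2*(n-1-k)+1] for k in range(n)]
    -- (the indices are always in range, so the .getD 0 default is never used)
    (PySem.List.pyRange 0 n 1).map (fun k =>
      if 2 * k < n then (PySem.List.pyGet? memories (2 * k)).getD 0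
      else (PySem.List.pyGet? memories (2 * (n - 1 - k) + 1)).getD 0)

-- ===== PRECONDITION & SPEC =====
def Spec_apply_best_at_edges (memories : List Int) (out : List Int) : Prop := out = apply_best_at_edges_alt memories
instance (memories : List Int) (out : List Int) : Decidable (Spec_apply_best_at_edges memories out) := by unfold Spec_apply_best_at_edges; infer_instance

-- ===== CLAIM (what is proved, stated in full; the proofs are below) =====
def Claim_equal_apply_best_at_edges : Prop := ∀ (memories : List Int), Dom_apply_best_at_edges memories → Spec_apply_best_at_edges memories (apply_best_at_edges memories)

-- ===== LEMMAS AND PROOFS =====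

-- elements at even / odd positions
def pvEvens : List Int → List Int
  | [] => []
  | [a] => [a]
  | a :: _ :: t => a :: pvEvens t

def pvOdds : List Int → List Int
  | [] => []
  | [_] => []
  | _ :: b :: t => b :: pvOdds t

theorem pv_mod_even {s : Int} (h : s % 2 = 0) : (PySem.Int.mod s 2 == 0) = true := by
  simp [h]

theorem pv_mod_odd {s : Int} (h : s % 2 = 0) : (PySem.Int.mod (s + 1) 2 == 0) = false := by
  have h1 : (s + 1) % 2 = 1 := by omega
  simp [h1]

-- A's fold appends the even-position elements to top and odd-position ones to bottom.
theorem pvA_fold (l : List Int) : ∀ (s : Int), s % 2 = 0 → ∀ (t0 b0 : List Int),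
    (PySem.List.enumerate l s).foldl
      (fun (st : List Int × List Int) p =>
        if PySem.Int.mod p.1 2 == 0 then (st.1 ++ [p.2], st.2) else (st.1, st.2 ++ [p.2]))
      (t0, b0) = (t0 ++ pvEvens l, b0 ++ pvOdds l) := by
  induction l using pvEvens.induct with
  | case1 => intro s _ t0 b0; simp [PySem.List.enumerate_nil, pvEvens, pvOdds]
  | case2 a => intro s hs t0 b0
               have hd : (2:Int) ∣ s := Int.dvd_of_emod_eq_zero hs
               simp [PySem.List.enumerate_cons, PySem.List.enumerate_nil, hd, pvEvens, pvOdds]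
  | case3 a b t ih =>
      intro s hs t0 b0
      have h2 : (s + 1 + 1) % 2 = 0 := by omega
      simp only [PySem.List.enumerate_cons, List.foldl_cons, pv_mod_even hs, pv_mod_odd hs,
                 if_true, if_false, Bool.false_eq_true]
      rw [ih (s + 1 + 1) h2]
      simp [pvEvens, pvOdds]

theorem pvEvens_length (l : List Int) : (pvEvens l).length = (l.length + 1) / 2 := by
  induction l using pvEvens.induct with
  | case1 => simp [pvEvens]
  | case2 a => simp [pvEvens]
  | case3 a b t ih => simp [pvEvens, ih]; omega

theorem pvOdds_length (l : List Int) : (pvOdds l).length = l.length / 2 := by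
  induction l using pvOdds.induct with
  | case1 => simp [pvOdds]
  | case2 a => simp [pvOdds]
  | case3 a b t ih => simp [pvOdds, ih]; omega

theorem pvEvens_getElem? (l : List Int) : ∀ (k : Nat), (pvEvens l)[k]? = l[2 * k]? := by
  induction l using pvEvens.induct with
  | case1 => intro k; simp [pvEvens]
  | case2 a => intro k; cases k with
    | zero => simp [pvEvens]
    | succ k => simp [pvEvens]
  | case3 a b t ih =>
      intro k; cases k with
      | zero => simp [pvEvens]
      | succ k =>
          have : 2 * (k + 1) = 2 * k + 1 + 1 := by omega
          simp [pvEvens, this, ih k]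

theorem pvOdds_getElem? (l : List Int) : ∀ (k : Nat), (pvOdds l)[k]? = l[2 * k + 1]? := by
  induction l using pvOdds.induct with
  | case1 => intro k; simp [pvOdds]
  | case2 a => intro k; simp [pvOdds]
  | case3 a b t ih =>
      intro k; cases k with
      | zero => simp [pvOdds]
      | succ k =>
          have : 2 * (k + 1) + 1 = 2 * k + 1 + 1 + 1 := by omega
          simp [pvOdds, this, ih k]

-- B's comprehension produces exactly evens ++ reverse odds.
theorem pvB_eq (l : List Int) :
    ((PySem.List.pyRange 0 (l.length : Int) 1).map (fun k =>
      if 2 * k < (l.length : Int) then (PySem.List.pyGet? l (2 * k)).getD 0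
      else (PySem.List.pyGet? l (2 * ((l.length : Int) - 1 - k) + 1)).getD 0))
    = pvEvens l ++ (pvOdds l).reverse := by
  have hel := pvEvens_length l
  have hol := pvOdds_length l
  apply List.ext_getElem?
  intro k
  by_cases hk : k < l.length
  · rw [PySem.List.getElem?_map_pyRange_zero _ _ _ hk]
    by_cases hsplit : 2 * k < l.length
    · -- left half: evens
      have hc : (2 * (k : Int) < (l.length : Int)) := by omega
      have hidx : (2 : Int) * (k : Int) = ((2 * k : Nat) : Int) := by push_cast; ring
      rw [if_pos hc, hidx, PySem.List.pyGet?_natCast]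
      have hkel : k < (pvEvens l).length := by omega
      rw [List.getElem?_append_left hkel, pvEvens_getElem?,
          List.getElem?_eq_getElem (by omega : 2 * k < l.length)]
      simp
    · -- right half: reversed odds
      have hc : ¬ (2 * (k : Int) < (l.length : Int)) := by omega
      have hidx : (2 : Int) * ((l.length : Int) - 1 - (k : Int)) + 1
          = ((2 * (l.length - 1 - k) + 1 : Nat) : Int) := by omega
      rw [if_neg hc, hidx, PySem.List.pyGet?_natCast]
      have hkel : (pvEvens l).length ≤ k := by omega
      rw [List.getElem?_append_right hkel]
      have hrev : ((pvOdds l).reverse)[k - (pvEvens l).length]?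
          = (pvOdds l)[(pvOdds l).length - 1 - (k - (pvEvens l).length)]? := by
        apply List.getElem?_reverse
        omega
      have heq : (pvOdds l).length - 1 - (k - (pvEvens l).length) = l.length - 1 - k := by
        rw [pvEvens_length, pvOdds_length]; omega
      rw [hrev, pvOdds_getElem?, heq,
          List.getElem?_eq_getElem (by omega : 2 * (l.length - 1 - k) + 1 < l.length)]
      simp
  · rw [List.getElem?_eq_none (by simp [PySem.List.length_pyRange_one]; omega),
        List.getElem?_eq_none (by simp [pvEvens_length, pvOdds_length]; omega)]

-- ===== VERDICT (by name: the statement is the Claim_ definition above) =====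
theorem apply_best_at_edges_spec : Claim_equal_apply_best_at_edges := by
  intro memories _
  unfold Spec_apply_best_at_edges apply_best_at_edges apply_best_at_edges_alt
  by_cases h : memories.length ≤ 2
  · simp [h]
  · simp only [h, if_false]
    rw [pvA_fold memories 0 (by norm_num) [] []]
    rw [pvB_eq memories]
    simp
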